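/- GENERATED by farm/worked/mk_tree_copies.py from farm/worked/cos/Proof.lean (a worked proof of the farm's unit `cos`,
   accepted by the verdict) — do not edit. -/
import Vorbis.Spec.Units.cos

open X86 X86.User Asan Vorbis

set_option maxRecDepth 4000
set_option maxHeartbeats 4000000

/-- `cos` satisfies its contract: `mov edi, 1 ; call sincos_quadrant ; ret`. -/
theorem Vorbis.Spec.Worked.cos_ok : Vorbis.Spec.cos.Statement := by
  intro Lay hLay μ hμ u₀ hcode hsq others frames u ret he hpre
  v_entry he
  have hsq' := hsq others frames
  have hsh : ShadowPre others frames u := hpre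
  u_walk hcode [hμ.vendor] span [Vorbis.L.textLo, Vorbis.L.textHi] side (v_side)
  · v_inv
  · show ShadowPre others frames s_102e65
    refine hsh.callee ?_ ?_ ?_ ?_
    · v_untouched
    · rw [w_rsp]
      u_omega
    · rw [w_rsp]
      u_omega
    · rw [w_rsp]
      u_omega
  · v_after_call w_rsp_102e65 w_mem_102e65
    have hs0 : UInt64.ofNat (s_102e65r.mem.readLE (u.reg .rsp) 8) = ret := by
      u_frame he_retAddr
    u_walk hcode [hμ.vendor] span [Vorbis.L.textLo, Vorbis.L.textHi] side (v_side)
    refine ReachVia.done ?_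
    v_returned
    show ShadowUntouched u.mem s_102e6a.mem
    v_untouched
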